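-- pv_equiv track=rewrite | github.com/Moges-Retta/pirk_analysis | pirk/calculations/pam.py | calculate_indices
-- ===== SOURCE A (Python) =====
-- def calculate_indices(pulses, ramp_lights):
--     indices = {'fs_begin': 0, 'fs_end': pulses[0] - 1}
--     start = indices['fs_end'] + 1
--
--     for i in range(1, len(ramp_lights)  + 1):
--         indices[f'Fm_{i}_begin'] = start
--         indices[f'Fm_{i}_end'] = start + pulses[i] - 1
--         start = indices[f'Fm_{i}_end'] + 1
--
--     # FoPrime
--     FoPrime_begin = indices[f'Fm_{len(ramp_lights) }_end'] + pulses[len(ramp_lights)  + 1]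
--     FoPrime_end = FoPrime_begin + pulses[len(ramp_lights)  + 1]
--     indices.update({'FoPrime_begin': FoPrime_begin, 'FoPrime_end': FoPrime_end})
--
--     return indices
-- ===== SOURCE B (Python) =====
-- def calculate_indices(pulses, ramp_lights):
--     # Two passes: first a prefix-sum offset table, then direct emission of the
--     # boundary dict from the table (instead of A's interleaved running-start loop).
--     n = len(ramp_lights)
--     offs = [0]
--     for p in pulses[:n + 1]:
--         offs.append(offs[-1] + p)
--     indices = {'fs_begin': 0, 'fs_end': pulses[0] - 1}
--     for i in range(1, n + 1):
--         indices[f'Fm_{i}_begin'] = offs[i]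
--         indices[f'Fm_{i}_end'] = offs[i + 1] - 1
--     fo_begin = offs[n + 1] - 1 + pulses[n + 1]
--     indices['FoPrime_begin'] = fo_begin
--     indices['FoPrime_end'] = fo_begin + pulses[n + 1]
--     return indices
-- ===== Notes on version B (the rewrite author's own statement) =====
-- stated objective: alternative
-- what changed: B first builds a prefix-sum offset table over pulses[0..n] in one pass, then a second pass emits each Fm_i begin/end by direct table lookup, replacing A's single interleaved loop that threads a running 'start' accumulator and reads values back out of the dict it is building.
-- outside the precondition, e.g. on calculate_indices([1], [7]): A raises IndexError, B raises IndexError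
import Mathlib
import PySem

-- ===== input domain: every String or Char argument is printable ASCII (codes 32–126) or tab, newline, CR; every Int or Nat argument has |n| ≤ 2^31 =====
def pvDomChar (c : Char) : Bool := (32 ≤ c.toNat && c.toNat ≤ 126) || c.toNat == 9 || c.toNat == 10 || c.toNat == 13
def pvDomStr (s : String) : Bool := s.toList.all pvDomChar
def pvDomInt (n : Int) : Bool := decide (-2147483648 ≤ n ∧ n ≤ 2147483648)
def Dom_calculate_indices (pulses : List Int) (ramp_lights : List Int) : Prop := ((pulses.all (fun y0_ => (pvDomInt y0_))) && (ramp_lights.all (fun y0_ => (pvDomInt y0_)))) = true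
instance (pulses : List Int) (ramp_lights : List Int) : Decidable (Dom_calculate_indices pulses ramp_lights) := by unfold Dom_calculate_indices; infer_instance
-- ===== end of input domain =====

-- B replaces A's interleaved running-start loop by a prefix-sum offset table built first
-- and a second pass that reads begin/end boundaries directly from the table (objective: alternative decomposition).

-- ===== PORT A =====
def calculate_indices (pulses : List Int) (ramp_lights : List Int) : List (String × Int) :=
  let d : PySem.Dict String Int :=
    (PySem.Dict.empty.insert "fs_begin" 0).insert "fs_end" (PySem.List.pyGetD pulses 0 0 - 1)
  let start : Int := d.getD "fs_end" 0 + 1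
  let n : Int := (ramp_lights.length : Int)
  let st := (PySem.List.pyRange 1 (n + 1) 1).foldl
    (fun (st : PySem.Dict String Int × Int) i =>
      let d1 := st.1.insert ("Fm_" ++ PySem.Int.toStr i ++ "_begin") st.2
      let d2 := d1.insert ("Fm_" ++ PySem.Int.toStr i ++ "_end")
                  (st.2 + PySem.List.pyGetD pulses i 0 - 1)
      (d2, d2.getD ("Fm_" ++ PySem.Int.toStr i ++ "_end") 0 + 1)) (d, start)
  let foB := st.1.getD ("Fm_" ++ PySem.Int.toStr n ++ "_end") 0 + PySem.List.pyGetD pulses (n + 1) 0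
  let foE := foB + PySem.List.pyGetD pulses (n + 1) 0
  ((st.1.insert "FoPrime_begin" foB).insert "FoPrime_end" foE).items

-- ===== PORT B =====
def calculate_indices_alt (pulses : List Int) (ramp_lights : List Int) : List (String × Int) :=
  let n : Nat := ramp_lights.length
  let offs : List Int :=
    (PySem.List.slice pulses (some 0) (some ((n : Int) + 1))).foldl
      (fun acc p => acc ++ [PySem.List.pyGetD acc (-1) 0 + p]) [0]
  let d : PySem.Dict String Int :=
    (PySem.Dict.empty.insert "fs_begin" 0).insert "fs_end" (PySem.List.pyGetD pulses 0 0 - 1)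
  let d := (PySem.List.pyRange 1 ((n : Int) + 1) 1).foldl
    (fun d i =>
      (d.insert ("Fm_" ++ PySem.Int.toStr i ++ "_begin") (PySem.List.pyGetD offs i 0)).insert
        ("Fm_" ++ PySem.Int.toStr i ++ "_end") (PySem.List.pyGetD offs (i + 1) 0 - 1)) d
  let foB := PySem.List.pyGetD offs ((n : Int) + 1) 0 - 1 + PySem.List.pyGetD pulses ((n : Int) + 1) 0
  ((d.insert "FoPrime_begin" foB).insert "FoPrime_end"
      (foB + PySem.List.pyGetD pulses ((n : Int) + 1) 0)).items

-- ===== PRECONDITION & SPEC =====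
-- Pre_ excludes exactly the inputs where A raises: ramp_lights = [] (KeyError on 'Fm_0_end')
-- and pulses shorter than len(ramp_lights)+2 (IndexError).
def Pre_calculate_indices (pulses : List Int) (ramp_lights : List Int) : Prop :=
  ramp_lights ≠ [] ∧ ramp_lights.length + 2 ≤ pulses.length
instance (pulses : List Int) (ramp_lights : List Int) : Decidable (Pre_calculate_indices pulses ramp_lights) := by unfold Pre_calculate_indices; infer_instance

def pvWitness_calculate_indices : List Int × List Int := ([1, 2, 3], [5])

def Spec_calculate_indices (pulses : List Int) (ramp_lights : List Int) (out : List (String × Int)) : Prop := out = calculate_indices_alt pulses ramp_lights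
instance (pulses : List Int) (ramp_lights : List Int) (out : List (String × Int)) : Decidable (Spec_calculate_indices pulses ramp_lights out) := by unfold Spec_calculate_indices; infer_instance

-- ===== CLAIM (what is proved, stated in full; the proofs are below) =====
def Claim_equal_calculate_indices : Prop := ∀ (pulses : List Int) (ramp_lights : List Int), Dom_calculate_indices pulses ramp_lights → Pre_calculate_indices pulses ramp_lights → Spec_calculate_indices pulses ramp_lights (calculate_indices pulses ramp_lights)


-- ===== LEMMAS AND PROOFS =====

-- running prefix sums starting from a
def scanSum : Int → List Int → List Int
  | _, [] => []
  | a, p :: xs => (a + p) :: scanSum (a + p) xs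

theorem fold_offs (xs : List Int) : ∀ (acc : List Int) (a : Int),
    PySem.List.pyGetD acc (-1) 0 = a → acc ≠ [] →
    xs.foldl (fun acc p => acc ++ [PySem.List.pyGetD acc (-1) 0 + p]) acc = acc ++ scanSum a xs := by
  induction xs with
  | nil => intro acc a _ _; simp [scanSum]
  | cons p xs ih =>
      intro acc a ha hne
      simp only [List.foldl_cons, ha]
      rw [ih (acc ++ [a + p]) (a + p) (PySem.List.pyGetD_neg_one_append_singleton acc (a + p) 0) (by simp)]
      simp [scanSum]

theorem offs_spec (xs : List Int) :
    xs.foldl (fun acc p => acc ++ [PySem.List.pyGetD acc (-1) 0 + p]) [0] = 0 :: scanSum 0 xs := by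
  have := fold_offs xs [0] 0 (by decide) (by decide)
  simpa using this

theorem scanSum_getD (xs : List Int) : ∀ (a : Int) (k : Nat), k < xs.length →
    (scanSum a xs).getD k 0 = a + (xs.take (k + 1)).sum := by
  induction xs with
  | nil => intro a k h; simp at h
  | cons p xs ih =>
      intro a k h
      cases k with
      | zero => simp [scanSum]
      | succ k =>
          have h2 := ih (a + p) k (by simpa using h)
          simp only [scanSum, List.getD_cons_succ, h2, List.take_succ_cons, List.sum_cons]
          ring

theorem offs_getD (pulses : List Int) (m j : Nat) (hlen : m ≤ pulses.length) (hj : j ≤ m) :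
    (0 :: scanSum 0 (pulses.take m)).getD j 0 = (pulses.take j).sum := by
  cases j with
  | zero => simp
  | succ j =>
      have hlt : j < (pulses.take m).length := by
        rw [List.length_take]; omega
      have := scanSum_getD (pulses.take m) 0 j hlt
      simp only [List.getD_cons_succ, this, List.take_take, zero_add]
      have hmin : min (j + 1) m = j + 1 := by omega
      rw [hmin]

theorem take_sum_succ (xs : List Int) (j : Nat) (hj : j < xs.length) :
    (xs.take (j + 1)).sum = (xs.take j).sum + PySem.List.pyGetD xs (j : Int) 0 := by
  rw [PySem.List.pyGetD_natCast, List.getD_eq_getElem?_getD, List.getElem?_eq_getElem hj]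
  exact List.sum_take_succ xs j hj

-- the two loops agree: A's state is (B's dict, running prefix sum), and the
-- last-inserted 'Fm_m_end' value is that prefix sum minus one
theorem loop_eq (pulses : List Int) (n : Nat) (hlen : n + 2 ≤ pulses.length) :
    ∀ (m : Nat), 1 ≤ m → m ≤ n → ∀ (d : PySem.Dict String Int),
    (((List.range m).map (fun k : Nat => (1 : Int) + (k : Int))).foldl
      (fun (st : PySem.Dict String Int × Int) i =>
        let d1 := st.1.insert ("Fm_" ++ PySem.Int.toStr i ++ "_begin") st.2
        let d2 := d1.insert ("Fm_" ++ PySem.Int.toStr i ++ "_end")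
                    (st.2 + PySem.List.pyGetD pulses i 0 - 1)
        (d2, d2.getD ("Fm_" ++ PySem.Int.toStr i ++ "_end") 0 + 1)) (d, (pulses.take 1).sum)
      = (((List.range m).map (fun k : Nat => (1 : Int) + (k : Int))).foldl
          (fun d i =>
            (d.insert ("Fm_" ++ PySem.Int.toStr i ++ "_begin")
                (PySem.List.pyGetD (0 :: scanSum 0 (pulses.take (n + 1))) i 0)).insert
              ("Fm_" ++ PySem.Int.toStr i ++ "_end")
              (PySem.List.pyGetD (0 :: scanSum 0 (pulses.take (n + 1))) (i + 1) 0 - 1)) d,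
         (pulses.take (m + 1)).sum))
    ∧ (((List.range m).map (fun k : Nat => (1 : Int) + (k : Int))).foldl
          (fun d i =>
            (d.insert ("Fm_" ++ PySem.Int.toStr i ++ "_begin")
                (PySem.List.pyGetD (0 :: scanSum 0 (pulses.take (n + 1))) i 0)).insert
              ("Fm_" ++ PySem.Int.toStr i ++ "_end")
              (PySem.List.pyGetD (0 :: scanSum 0 (pulses.take (n + 1))) (i + 1) 0 - 1)) d).getD
        ("Fm_" ++ PySem.Int.toStr (m : Int) ++ "_end") 0 = (pulses.take (m + 1)).sum - 1 := by
  intro m hm1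
  induction m, hm1 using Nat.le_induction with
  | base =>
      intro hmn d
      have e1 : PySem.List.pyGetD (0 :: scanSum 0 (pulses.take (n + 1))) (1 : Int) 0
          = (pulses.take 1).sum := by
        rw [show (1 : Int) = ((1 : Nat) : Int) by norm_num, PySem.List.pyGetD_natCast]
        exact offs_getD pulses (n + 1) 1 (by omega) (by omega)
      have e2 : PySem.List.pyGetD (0 :: scanSum 0 (pulses.take (n + 1))) ((1 : Int) + 1) 0
          = (pulses.take 2).sum := by
        rw [show ((1 : Int) + 1) = ((2 : Nat) : Int) by norm_num, PySem.List.pyGetD_natCast]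
        exact offs_getD pulses (n + 1) 2 (by omega) (by omega)
      have e3 : (pulses.take 1).sum + PySem.List.pyGetD pulses (1 : Int) 0 - 1
          = (pulses.take 2).sum - 1 := by
        have h := take_sum_succ pulses 1 (by omega)
        norm_num at h
        omega
      simp only [List.range_one, List.map_cons, List.map_nil, Nat.cast_zero, add_zero,
        Nat.cast_one, List.foldl_cons, List.foldl_nil]
      rw [e1, e2, e3]
      refine ⟨?_, ?_⟩
      · rw [PySem.Dict.getD_insert_self, Prod.mk.injEq]
        exact ⟨rfl, by ring⟩
      · rw [PySem.Dict.getD_insert_self]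
  | succ m hm ih =>
      intro hmn d
      have IH := ih (by omega) d
      have hc : (1 : Int) + (m : Int) = ((m + 1 : Nat) : Int) := by push_cast; ring
      have e1 : PySem.List.pyGetD (0 :: scanSum 0 (pulses.take (n + 1))) (((m + 1 : Nat) : Int)) 0
          = (pulses.take (m + 1)).sum := by
        rw [PySem.List.pyGetD_natCast]
        exact offs_getD pulses (n + 1) (m + 1) (by omega) (by omega)
      have e2 : PySem.List.pyGetD (0 :: scanSum 0 (pulses.take (n + 1))) ((((m + 1 : Nat) : Int)) + 1) 0
          = (pulses.take (m + 1 + 1)).sum := by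
        rw [show (((m + 1 : Nat) : Int) + 1) = ((m + 1 + 1 : Nat) : Int) by push_cast; ring,
          PySem.List.pyGetD_natCast]
        exact offs_getD pulses (n + 1) (m + 1 + 1) (by omega) (by omega)
      have e3 : (pulses.take (m + 1)).sum + PySem.List.pyGetD pulses (((m + 1 : Nat) : Int)) 0 - 1
          = (pulses.take (m + 1 + 1)).sum - 1 := by
        have h := take_sum_succ pulses (m + 1) (by omega)
        omega
      rw [List.range_succ, List.map_append, List.foldl_append, List.foldl_append, IH.1]
      simp only [List.map_cons, List.map_nil, List.foldl_cons, List.foldl_nil]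
      rw [hc, e1, e2, e3]
      refine ⟨?_, ?_⟩
      · rw [PySem.Dict.getD_insert_self, Prod.mk.injEq]
        exact ⟨rfl, by ring⟩
      · rw [PySem.Dict.getD_insert_self]

-- ===== VERDICT (by name: the statement is the Claim_ definition above) =====
theorem calculate_indices_spec : Claim_equal_calculate_indices := by
  intro pulses ramp_lights _ hpre
  obtain ⟨hne, hlen0⟩ := hpre
  unfold Spec_calculate_indices
  have hn1 : 1 ≤ ramp_lights.length := by
    cases ramp_lights with
    | nil => exact absurd rfl hne
    | cons a l => simp
  set n := ramp_lights.length with hn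
  have hlen : n + 2 ≤ pulses.length := hlen0
  have hs : PySem.List.slice pulses (some 0) (some ((n : Int) + 1)) = pulses.take (n + 1) := by
    rw [show ((n : Int) + 1) = ((n + 1 : Nat) : Int) by push_cast; ring]
    rw [PySem.List.slice_zero_start, PySem.List.slice_to_natCast]
  have hr : PySem.List.pyRange 1 ((n : Int) + 1) 1
      = (List.range n).map (fun k : Nat => (1 : Int) + (k : Int)) := by
    rw [PySem.List.pyRange_one, show ((n : Int) + 1 - 1).toNat = n by omega]
  have hstart : PySem.List.pyGetD pulses 0 0 - 1 + 1 = (pulses.take 1).sum := by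
    have h := take_sum_succ pulses 0 (by omega)
    simp at h
    omega
  have eo : PySem.List.pyGetD (0 :: scanSum 0 (pulses.take (n + 1))) ((n : Int) + 1) 0
      = (pulses.take (n + 1)).sum := by
    rw [show ((n : Int) + 1) = ((n + 1 : Nat) : Int) by push_cast; ring, PySem.List.pyGetD_natCast]
    exact offs_getD pulses (n + 1) (n + 1) (by omega) (by omega)
  have L := loop_eq pulses n hlen n hn1 (le_refl n)
    ((PySem.Dict.empty.insert "fs_begin" (0 : Int)).insert "fs_end" (PySem.List.pyGetD pulses 0 0 - 1))
  simp only [calculate_indices, calculate_indices_alt]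
  rw [hs, offs_spec, hr, PySem.Dict.getD_insert_self, hstart, L.1, L.2, eo]
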